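-- pv_equiv track=rewrite | github.com/ayonrakib/Python-Programming | AdvancedFeatures/assignment.py | getNNumbers
-- ===== SOURCE A (Python) =====
-- import itertools
--
-- def getNNumbers(n):
--     numbers = []
--     for count in range(1,101):
--         numbers.append(count)
--     targetNumbers = []
--     for number in itertools.cycle(numbers):
--         if len(targetNumbers) == n:
--             return targetNumbers
--         targetNumbers.append(number)
-- ===== SOURCE B (Python) =====
-- def getNNumbers(n):
--     q, r = divmod(n, 100)
--     return list(range(1, 101)) * q + list(range(1, r + 1))
-- ===== Notes on version B (the rewrite author's own statement) =====
-- stated objective: alternative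
-- what changed: B builds the answer by block replication: divmod(n,100) gives the number of full 1..100 blocks and the remainder, and the result is the block list repeated q times plus a final range(1, r+1) tail, with no per-element loop; A cycles an itertools.cycle iterator appending one element at a time. Pre_ excludes n < 0, where A loops forever while B returns a list.
import Mathlib
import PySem

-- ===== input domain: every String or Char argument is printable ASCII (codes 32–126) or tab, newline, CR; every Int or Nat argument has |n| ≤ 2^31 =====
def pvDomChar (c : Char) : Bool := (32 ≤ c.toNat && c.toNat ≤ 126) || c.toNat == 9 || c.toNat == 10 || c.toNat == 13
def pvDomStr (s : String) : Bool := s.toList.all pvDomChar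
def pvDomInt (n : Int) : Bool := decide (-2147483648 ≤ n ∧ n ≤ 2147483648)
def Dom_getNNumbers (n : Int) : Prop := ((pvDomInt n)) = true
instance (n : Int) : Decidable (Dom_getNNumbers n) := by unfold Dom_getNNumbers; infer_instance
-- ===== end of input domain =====

-- B builds the result by block replication (full 1..100 blocks via divmod, plus a range tail);
-- A appends element by element from an itertools.cycle iterator.

-- ===== PORT A =====
-- numbers = [count for count in range(1,101)] built by the explicit append loop
def getNNumbersNumbers : List Int :=
  (PySem.List.pyRange 1 101 1).foldl (fun acc count => acc ++ [count]) []

-- the 'for number in itertools.cycle(numbers)' loop: under Pre_ (0 ≤ n) it appends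
-- exactly n times; the cycle iterator's position is the append count mod len(numbers)
-- (itertools.cycle restarts at 0); each append is a cons on the reversed accumulator.
def getNNumbers (n : Int) : List Int :=
  let numbers := getNNumbersNumbers
  let L := numbers.length
  ((List.range n.toNat).foldl
      (fun targetNumbers j => numbers.getD (j % L) 0 :: targetNumbers) []).reverse

-- ===== PORT B =====
-- Source B: q, r = divmod(n, 100); list(range(1,101)) * q + list(range(1, r+1)).
-- Python list * q is [] for q ≤ 0, hence the .toNat on the repetition count.
def getNNumbers_alt (n : Int) : List Int :=
  let q := PySem.Int.floordiv n 100
  let r := PySem.Int.mod n 100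
  (List.replicate q.toNat (PySem.List.pyRange 1 101 1)).flatten ++ PySem.List.pyRange 1 (r + 1) 1

-- ===== PRECONDITION & SPEC =====
-- Pre_ excludes n < 0, where A loops forever (len(targetNumbers) never equals n).
def Pre_getNNumbers (n : Int) : Prop := 0 ≤ n
instance (n : Int) : Decidable (Pre_getNNumbers n) := by unfold Pre_getNNumbers; infer_instance
def pvWitness_getNNumbers : Int := (5)

def Spec_getNNumbers (n : Int) (out : List Int) : Prop := out = getNNumbers_alt n
instance (n : Int) (out : List Int) : Decidable (Spec_getNNumbers n out) := by unfold Spec_getNNumbers; infer_instance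

-- ===== CLAIM (what is proved, stated in full; the proofs are below) =====
def Claim_equal_getNNumbers : Prop := ∀ (n : Int), Dom_getNNumbers n → Pre_getNNumbers n → Spec_getNNumbers n (getNNumbers n)

-- ===== LEMMAS AND PROOFS =====

set_option maxRecDepth 4000 in
theorem numbers_getD : ∀ j < 100, getNNumbersNumbers.getD j 0 = (j : Int) + 1 := by decide

set_option maxRecDepth 4000 in
theorem numbers_length : getNNumbersNumbers.length = 100 := by decide

-- one full block of the cycle equals the 1..100 list
set_option maxRecDepth 4000 in
theorem block_eq :
    (List.range 100).map (fun j : Nat => getNNumbersNumbers.getD (j % 100) 0)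
      = PySem.List.pyRange 1 101 1 := by decide

-- a cons-accumulating foldl followed by reverse is a map
theorem foldl_cons_rev {α β : Type} (g : α → β) :
    ∀ (l : List α) (acc : List β),
      (l.foldl (fun acc x => g x :: acc) acc).reverse = acc.reverse ++ l.map g := by
  intro l
  induction l with
  | nil => intro acc; simp
  | cons x xs ih => intro acc; simp only [List.foldl, ih, List.reverse_cons, List.map_cons]; simp

-- the cycle map over range (100*q + r) splits into q full blocks and a tail
theorem cycle_split (q : Nat) :
    ∀ r : Nat, r < 100 →
      (List.range (100 * q + r)).map (fun j : Nat => getNNumbersNumbers.getD (j % 100) 0)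
        = (List.replicate q (PySem.List.pyRange 1 101 1)).flatten
            ++ (List.range r).map (fun j : Nat => getNNumbersNumbers.getD (j % 100) 0) := by
  induction q with
  | zero => intro r _; simp
  | succ q ih =>
      intro r hr
      have hsplit : 100 * (q + 1) + r = 100 + (100 * q + r) := by ring
      rw [hsplit, List.range_add, List.map_append, List.map_map]
      have hshift :
          ((fun j : Nat => getNNumbersNumbers.getD (j % 100) 0) ∘ (fun j => 100 + j))
            = fun j : Nat => getNNumbersNumbers.getD (j % 100) 0 := by
        funext j
        simp [Function.comp]
      rw [hshift, ih r hr, block_eq, List.replicate_succ, List.flatten_cons, List.append_assoc]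

-- the tail: for r < 100 the cycle map over range r is the 1..r list
theorem tail_eq (r : Nat) (hr : r < 100) :
    (List.range r).map (fun j : Nat => getNNumbersNumbers.getD (j % 100) 0)
      = PySem.List.pyRange 1 ((r : Int) + 1) 1 := by
  rw [PySem.List.pyRange_one]
  have : ((r : Int) + 1 - 1).toNat = r := by omega
  rw [this]
  apply List.map_congr_left
  intro j hj
  have hj' : j < r := List.mem_range.mp hj
  rw [Nat.mod_eq_of_lt (by omega), numbers_getD j (by omega)]
  ring

-- ===== VERDICT (by name: the statement is the Claim_ definition above) =====
theorem getNNumbers_spec : Claim_equal_getNNumbers := by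
  intro n _ hn
  unfold Spec_getNNumbers getNNumbers getNNumbers_alt
  simp only [numbers_length]
  rw [foldl_cons_rev (fun j : Nat => getNNumbersNumbers.getD (j % 100) 0)]
  simp only [List.reverse_nil, List.nil_append]
  have h0 : (0:Int) ≤ n := hn
  have hq : (PySem.Int.floordiv n 100).toNat = n.toNat / 100 := by
    rw [PySem.Int.floordiv_eq_ediv_of_pos (by norm_num)]
    omega
  have hr : PySem.Int.mod n 100 = ((n.toNat % 100 : Nat) : Int) := by
    rw [PySem.Int.mod_eq_emod_of_pos (by norm_num)]
    omega
  have hn' : n.toNat = 100 * (n.toNat / 100) + n.toNat % 100 := by omega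
  rw [hq, hr]
  conv_lhs => rw [hn']
  rw [cycle_split _ _ (Nat.mod_lt _ (by norm_num)),
      tail_eq _ (Nat.mod_lt _ (by norm_num))]
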